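-- pv_equiv track=rewrite | github.com/Surojit04/baby-nutrition-checker | app.py | analyze_nutrition
-- ===== SOURCE A (Python) =====
-- NUTRIENT_DATA = {
--     'MILK': 'VITAMIN D, CALCIUM',
--     'SUBSTITUTE': 'VITAMIN D, CALCIUM',
--     'RICE': 'VITAMIN B12',
--     'BREAD': 'IRON, VITAMIN B12',
--     'VEGETABLES': 'VITAMIN A, VITAMIN C, VITAMIN K',
--     'EGG': ' VITAMIN D,  IRON, ZINC',
--     'FISH': 'VITAMIN D,  ZINC',
--     'CHICKEN': 'VITAMIN B12, ZINC',
--     'RED_MEAT': 'IRON, ZINC',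
--     'SATTU': 'VITAMIN B12, IRON',
--     'FRUIT': 'VITAMIN C, VITAMIN A',
--     'SNAILS': 'VITAMIN B12, IRON',
-- }
--
-- def analyze_nutrition(age, selected_foods):
--     unique_foods = set(selected_foods)  # Remove duplicates
--     nutritional_columns = ['CALCIUM', 'IRON', 'VITAMIN A', 'VITAMIN B12', 'VITAMIN C', 'VITAMIN D', 'VITAMIN K', 'ZINC']
--     results = {nutrient: 'NO' for nutrient in nutritional_columns}  # Default to 'NO'
--
--     # Analyze selected foods and update results
--     for food in unique_foods:
--         if food in NUTRIENT_DATA: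
--             nutrients = NUTRIENT_DATA[food].split(', ')
--             for nutrient in nutrients:
--                 if nutrient in results:
--                     results[nutrient] = 'YES'
--
--     yes_count = sum(1 for v in results.values() if v == 'YES')  # Count the 'YES' values
--     return results, yes_count
-- ===== SOURCE B (Python) =====
-- NUTRIENT_DATA = {
--     'MILK': 'VITAMIN D, CALCIUM',
--     'SUBSTITUTE': 'VITAMIN D, CALCIUM',
--     'RICE': 'VITAMIN B12',
--     'BREAD': 'IRON, VITAMIN B12',
--     'VEGETABLES': 'VITAMIN A, VITAMIN C, VITAMIN K',
--     'EGG': ' VITAMIN D,  IRON, ZINC',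
--     'FISH': 'VITAMIN D,  ZINC',
--     'CHICKEN': 'VITAMIN B12, ZINC',
--     'RED_MEAT': 'IRON, ZINC',
--     'SATTU': 'VITAMIN B12, IRON',
--     'FRUIT': 'VITAMIN C, VITAMIN A',
--     'SNAILS': 'VITAMIN B12, IRON',
-- }
--
-- NUTRIENT_COLUMNS = ['CALCIUM', 'IRON', 'VITAMIN A', 'VITAMIN B12', 'VITAMIN C', 'VITAMIN D', 'VITAMIN K', 'ZINC']
--
-- # Reverse index, built once at module level: column -> set of foods providing it
-- # (same split(', ') tokenization, so mis-spaced tokens drop identically).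
-- NUTRIENT_TO_FOODS = {col: set() for col in NUTRIENT_COLUMNS}
-- for _food, _nutrients in NUTRIENT_DATA.items():
--     for _token in _nutrients.split(', '):
--         if _token in NUTRIENT_TO_FOODS:
--             NUTRIENT_TO_FOODS[_token].add(_food)
--
--
-- def analyze_nutrition(age, selected_foods):
--     unique_foods = set(selected_foods)
--     results = {col: ('YES' if NUTRIENT_TO_FOODS[col] & unique_foods else 'NO')
--                for col in NUTRIENT_COLUMNS}
--     yes_count = sum(1 for v in results.values() if v == 'YES')
--     return results, yes_count
-- ===== Notes on version B (the rewrite author's own statement) =====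
-- stated objective: alternative
-- what changed: Replaces the food-by-food string-splitting loop with a module-level reverse index (nutrient column -> set of foods, built with the same split(', ') tokenization) so analyze_nutrition just tests one set intersection per column; the per-call work no longer splits any strings.
import Mathlib
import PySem

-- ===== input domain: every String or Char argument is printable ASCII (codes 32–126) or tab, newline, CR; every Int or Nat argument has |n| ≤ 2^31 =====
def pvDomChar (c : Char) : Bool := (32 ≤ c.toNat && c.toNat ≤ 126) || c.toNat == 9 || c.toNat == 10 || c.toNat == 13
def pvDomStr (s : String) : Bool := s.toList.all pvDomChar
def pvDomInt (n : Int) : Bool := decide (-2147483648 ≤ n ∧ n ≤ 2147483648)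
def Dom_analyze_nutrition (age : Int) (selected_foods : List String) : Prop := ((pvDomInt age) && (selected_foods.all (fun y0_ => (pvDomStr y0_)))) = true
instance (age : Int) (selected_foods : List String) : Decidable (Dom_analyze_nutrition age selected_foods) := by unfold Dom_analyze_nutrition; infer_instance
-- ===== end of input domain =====

-- B replaces the per-call food-by-food string splitting with a module-level reverse index
-- (nutrient column -> set of foods, same split(', ') tokenization) and per-column set
-- intersection; same return value, objective: alternative decomposition.


-- ===== PORT A =====
def NUTRIENT_DATA : PySem.Dict String String := ⟨[
  ("MILK", "VITAMIN D, CALCIUM"),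
  ("SUBSTITUTE", "VITAMIN D, CALCIUM"),
  ("RICE", "VITAMIN B12"),
  ("BREAD", "IRON, VITAMIN B12"),
  ("VEGETABLES", "VITAMIN A, VITAMIN C, VITAMIN K"),
  ("EGG", " VITAMIN D,  IRON, ZINC"),
  ("FISH", "VITAMIN D,  ZINC"),
  ("CHICKEN", "VITAMIN B12, ZINC"),
  ("RED_MEAT", "IRON, ZINC"),
  ("SATTU", "VITAMIN B12, IRON"),
  ("FRUIT", "VITAMIN C, VITAMIN A"),
  ("SNAILS", "VITAMIN B12, IRON")]⟩

def analyze_nutrition (age : Int) (selected_foods : List String) : (List (String × String)) × Int :=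
  let unique_foods : PySem.Set String := PySem.Set.ofList selected_foods
  let nutritional_columns : List String :=
    ["CALCIUM", "IRON", "VITAMIN A", "VITAMIN B12", "VITAMIN C", "VITAMIN D", "VITAMIN K", "ZINC"]
  let results : PySem.Dict String String :=
    nutritional_columns.foldl (fun d n => d.insert n "NO") PySem.Dict.empty
  -- set iteration order does not matter here: only 'YES' is ever written into fixed keys
  let results : PySem.Dict String String :=
    unique_foods.foldl (fun res food =>
      match NUTRIENT_DATA.get? food with
      | some nutrients =>
          (((PySem.Str.split? nutrients ", ").getD [])).foldl
            (fun r nutrient => if r.contains nutrient then r.insert nutrient "YES" else r) res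
      | none => res) results
  let yes_count : Int := results.values.foldl (fun acc v => if v = "YES" then acc + 1 else acc) 0
  (results.items, yes_count)

-- ===== PORT B =====
def NUTRIENT_COLUMNS : List String :=
  ["CALCIUM", "IRON", "VITAMIN A", "VITAMIN B12", "VITAMIN C", "VITAMIN D", "VITAMIN K", "ZINC"]

-- module-level reverse index: column -> set of foods providing it
def NUTRIENT_TO_FOODS : PySem.Dict String (PySem.Set String) :=
  NUTRIENT_DATA.items.foldl (fun d fn =>
      (((PySem.Str.split? fn.2 ", ").getD [])).foldl (fun d token =>
          if d.contains token then d.modify token PySem.Set.empty (fun s => PySem.Set.add s fn.1) else d) d)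
    (NUTRIENT_COLUMNS.foldl (fun d col => d.insert col PySem.Set.empty) PySem.Dict.empty)

def analyze_nutrition_alt (age : Int) (selected_foods : List String) : (List (String × String)) × Int :=
  let unique_foods : PySem.Set String := PySem.Set.ofList selected_foods
  let results : PySem.Dict String String :=
    NUTRIENT_COLUMNS.foldl (fun d col =>
      d.insert col
        (if PySem.Set.inter (NUTRIENT_TO_FOODS.getD col PySem.Set.empty) unique_foods ≠ [] then "YES" else "NO"))
      PySem.Dict.empty
  let yes_count : Int := results.values.foldl (fun acc v => if v = "YES" then acc + 1 else acc) 0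
  (results.items, yes_count)

-- ===== PRECONDITION & SPEC =====
def Spec_analyze_nutrition (age : Int) (selected_foods : List String) (out : (List (String × String)) × Int) : Prop := out = analyze_nutrition_alt age selected_foods
instance (age : Int) (selected_foods : List String) (out : (List (String × String)) × Int) : Decidable (Spec_analyze_nutrition age selected_foods out) := by unfold Spec_analyze_nutrition; infer_instance

-- ===== CLAIM (what is proved, stated in full; the proofs are below) =====
def Claim_equal_analyze_nutrition : Prop := ∀ (age : Int) (selected_foods : List String), Dom_analyze_nutrition age selected_foods → Spec_analyze_nutrition age selected_foods (analyze_nutrition age selected_foods)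

-- ===== LEMMAS AND PROOFS =====

def pvCols : List String :=
  ["CALCIUM", "IRON", "VITAMIN A", "VITAMIN B12", "VITAMIN C", "VITAMIN D", "VITAMIN K", "ZINC"]

-- 'food provides column c' according to A's tokenization
def pvHit (f c : String) : Bool :=
  match NUTRIENT_DATA.get? f with
  | some s => (((PySem.Str.split? s ", ").getD [])).contains c
  | none => false

-- a results dict over the 8 fixed columns with value function v
def pvMk (v : String → String) : PySem.Dict String String := ⟨pvCols.map (fun c => (c, v c))⟩

theorem pvMk_cong {v w : String → String} (h : ∀ c ∈ pvCols, v c = w c) : pvMk v = pvMk w := by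
  unfold pvMk
  exact congrArg _ (List.map_congr_left (fun c hc => by rw [h c hc]))

theorem pvMk_contains (v : String → String) (n : String) :
    (pvMk v).contains n = decide (n ∈ pvCols) := by
  rw [PySem.Dict.contains_eq_decide_mem_keys]
  unfold pvMk
  simp [PySem.Dict.keys]

theorem pvMk_insert (v : String → String) (c : String) (hc : c ∈ pvCols) :
    (pvMk v).insert c "YES" = pvMk (fun c' => if c' = c then "YES" else v c') := by
  have hcon : (pvMk v).contains c = true := by rw [pvMk_contains]; simpa using hc
  apply PySem.Dict.ext
  rw [PySem.Dict.items_insert_of_contains (pvMk v) "YES" hcon]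
  unfold pvMk
  simp only [List.map_map]
  apply List.map_congr_left
  intro a _
  by_cases h : a = c <;> simp [h]

theorem pv_token_fold (ts : List String) (v : String → String) :
    ts.foldl (fun r nutrient => if r.contains nutrient then r.insert nutrient "YES" else r) (pvMk v)
      = pvMk (fun c => if ts.contains c then "YES" else v c) := by
  induction ts generalizing v with
  | nil => exact pvMk_cong (by intro c _; simp)
  | cons n rest ih =>
    simp only [List.foldl_cons, pvMk_contains]
    by_cases hn : n ∈ pvCols
    · rw [if_pos (by simpa using hn), pvMk_insert v n hn, ih]
      apply pvMk_cong
      intro c _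
      by_cases h : c = n <;> simp [h, List.contains_cons]
    · rw [if_neg (by simpa using hn), ih]
      apply pvMk_cong
      intro c hc
      have hcn : c ≠ n := fun h => hn (h ▸ hc)
      simp [List.contains_cons, hcn, Ne.symm hcn]

theorem pv_food_fold (fs : List String) (v : String → String) :
    fs.foldl (fun res food =>
      match NUTRIENT_DATA.get? food with
      | some nutrients =>
          (((PySem.Str.split? nutrients ", ").getD [])).foldl
            (fun r nutrient => if r.contains nutrient then r.insert nutrient "YES" else r) res
      | none => res) (pvMk v)
      = pvMk (fun c => if fs.any (fun f => pvHit f c) then "YES" else v c) := by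
  induction fs generalizing v with
  | nil => exact pvMk_cong (by intro c _; simp)
  | cons f rest ih =>
    simp only [List.foldl_cons]
    cases hf : NUTRIENT_DATA.get? f with
    | none =>
      simp only [hf, ih]
      apply pvMk_cong
      intro c _
      simp [pvHit, hf]
    | some nuts =>
      simp only [hf, pv_token_fold, ih]
      apply pvMk_cong
      intro c _
      have hh : pvHit f c = (((PySem.Str.split? nuts ", ").getD [])).contains c := by
        simp [pvHit, hf]
      simp only [List.any_cons, hh]
      cases hsp : (((PySem.Str.split? nuts ", ").getD [])).contains c <;>
        cases hrest : rest.any (fun g => pvHit g c) <;> simp [hsp, hrest]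

theorem pvIDX : NUTRIENT_TO_FOODS = ⟨[
    ("CALCIUM", ["MILK", "SUBSTITUTE"]),
    ("IRON", ["BREAD", "RED_MEAT", "SATTU", "SNAILS"]),
    ("VITAMIN A", ["VEGETABLES", "FRUIT"]),
    ("VITAMIN B12", ["RICE", "BREAD", "CHICKEN", "SATTU", "SNAILS"]),
    ("VITAMIN C", ["VEGETABLES", "FRUIT"]),
    ("VITAMIN D", ["MILK", "SUBSTITUTE", "FISH"]),
    ("VITAMIN K", ["VEGETABLES"]),
    ("ZINC", ["EGG", "CHICKEN", "RED_MEAT"])]⟩ := by decide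

theorem pv_index_subset : ∀ c ∈ pvCols, ∀ g ∈ NUTRIENT_TO_FOODS.getD c PySem.Set.empty,
    g ∈ (["MILK", "SUBSTITUTE", "RICE", "BREAD", "VEGETABLES", "EGG", "FISH", "CHICKEN",
          "RED_MEAT", "SATTU", "FRUIT", "SNAILS"] : List String) := by
  rw [pvIDX]; decide

theorem pv_index_mem (c : String) (hc : c ∈ pvCols) (f : String) :
    f ∈ NUTRIENT_TO_FOODS.getD c PySem.Set.empty ↔ pvHit f c = true := by
  by_cases hf : f ∈ (["MILK", "SUBSTITUTE", "RICE", "BREAD", "VEGETABLES", "EGG", "FISH",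
      "CHICKEN", "RED_MEAT", "SATTU", "FRUIT", "SNAILS"] : List String)
  · rw [pvIDX]
    fin_cases hc <;> fin_cases hf <;> decide
  · constructor
    · intro hmem
      exact absurd (pv_index_subset c hc f hmem) hf
    · intro hhit
      exfalso
      have hnone : NUTRIENT_DATA.get? f = none := by
        rw [PySem.Dict.get?_eq_none_iff_not_mem_keys]
        intro hk
        apply hf
        simpa [NUTRIENT_DATA, PySem.Dict.keys] using hk
      simp [pvHit, hnone] at hhit

theorem pv_cond (sf : List String) (c : String) (hc : c ∈ pvCols) :
    (PySem.Set.inter (NUTRIENT_TO_FOODS.getD c PySem.Set.empty) (PySem.Set.ofList sf) ≠ [])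
      ↔ ((PySem.Set.ofList sf).any (fun f => pvHit f c) = true) := by
  constructor
  · intro h
    obtain ⟨y, hy⟩ := List.exists_mem_of_ne_nil _ h
    obtain ⟨h1, h2⟩ := (PySem.Set.mem_inter _ _ _).1 hy
    exact List.any_eq_true.2 ⟨y, h2, (pv_index_mem c hc y).1 h1⟩
  · intro h hnil
    obtain ⟨y, hy, hhit⟩ := List.any_eq_true.1 h
    have : y ∈ PySem.Set.inter (NUTRIENT_TO_FOODS.getD c PySem.Set.empty) (PySem.Set.ofList sf) :=
      (PySem.Set.mem_inter _ _ _).2 ⟨(pv_index_mem c hc y).2 hhit, hy⟩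
    rw [hnil] at this
    exact absurd this (List.not_mem_nil)

theorem pv_B_results (sf : List String) :
    NUTRIENT_COLUMNS.foldl (fun d col =>
      d.insert col
        (if PySem.Set.inter (NUTRIENT_TO_FOODS.getD col PySem.Set.empty) (PySem.Set.ofList sf) ≠ [] then "YES" else "NO"))
      PySem.Dict.empty
    = pvMk (fun col => if PySem.Set.inter (NUTRIENT_TO_FOODS.getD col PySem.Set.empty) (PySem.Set.ofList sf) ≠ [] then "YES" else "NO") := by
  apply PySem.Dict.ext
  rw [PySem.Dict.items_foldl_insert_fresh NUTRIENT_COLUMNS (fun a => a)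
      (fun col => if PySem.Set.inter (NUTRIENT_TO_FOODS.getD col PySem.Set.empty) (PySem.Set.ofList sf) ≠ [] then "YES" else "NO")
      PySem.Dict.empty (by decide) (by decide)]
  rfl

-- ===== VERDICT (by name: the statement is the Claim_ definition above) =====
theorem analyze_nutrition_spec : Claim_equal_analyze_nutrition := by
  intro age sf _
  show analyze_nutrition age sf = analyze_nutrition_alt age sf
  have hinit : (["CALCIUM", "IRON", "VITAMIN A", "VITAMIN B12", "VITAMIN C", "VITAMIN D", "VITAMIN K", "ZINC"] : List String).foldl
      (fun d n => d.insert n "NO") PySem.Dict.empty = pvMk (fun _ => "NO") := by decide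
  simp only [analyze_nutrition, analyze_nutrition_alt]
  rw [hinit, pv_food_fold, pv_B_results,
    pvMk_cong (v := fun col => if PySem.Set.inter (NUTRIENT_TO_FOODS.getD col PySem.Set.empty) (PySem.Set.ofList sf) ≠ [] then "YES" else "NO")
      (w := fun c => if (PySem.Set.ofList sf).any (fun f => pvHit f c) then "YES" else "NO")
      (fun c hc => if_congr (pv_cond sf c hc) rfl rfl)]
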